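-- pv_equiv track=rewrite | github.com/pypi-data/pypi-mirror-274 | packages/ToolBiox/ToolBiox-0.0.46.tar.gz/ToolBiox-0.0.46/toolbiox/lib/xuyuxing/math/set_operating.py | site_cluster
-- ===== SOURCE A (Python) =====
-- def site_cluster(site_list, max_gap):
--     """
--     a function that will find site cluster which def by max_gap on one dimensional space
--     :param site_list: if on interval_mode, input should be a list of tuples
--                       e.g. intervals = [(1,5),(33,35),(40,33),(10,15),(13,18),(28,23),(70,80),(22,25),(38,50),(40,60)]
--                       else:
--                       input should be a list of int
--                       e.g. list = [1,23,4,32,34]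
--     :return: merged list
--     """
--
--     sorted_list = sorted(list(set(site_list)))
--     cluster_list = []
--     temp_cluster = []
--     for temp in sorted_list:
--         if not temp_cluster:
--             temp_cluster.append(temp)
--         else:
--             lower = temp_cluster[-1]
--             if temp - lower <= max_gap:
--                 temp_cluster.append(temp)
--             else:
--                 cluster_list.append(tuple(temp_cluster))
--                 temp_cluster = []
--                 temp_cluster.append(temp)
--     cluster_list.append(tuple(temp_cluster))
--     return cluster_list
-- ===== SOURCE B (Python) =====
-- def site_cluster(site_list, max_gap):
--     """Cluster the sorted distinct sites by max_gap in two staged passes: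
--     first compute the break indices (where the gap to the previous site
--     exceeds max_gap), then cut the sorted list into slices at those indices."""
--     s = sorted(set(site_list))
--     cuts = [0] + [i for i in range(1, len(s)) if s[i] - s[i - 1] > max_gap] + [len(s)]
--     return [tuple(s[a:b]) for a, b in zip(cuts, cuts[1:])]
-- ===== Notes on version B (the rewrite author's own statement) =====
-- stated objective: alternative
-- what changed: B replaces A's streaming accumulator loop by two staged index-based passes: it first computes the list of break indices where adjacent sorted sites differ by more than max_gap, then slices the sorted list at those cut points; the empty input yields one empty slice, matching A's unconditional final append with no special case.
import Mathlib
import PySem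

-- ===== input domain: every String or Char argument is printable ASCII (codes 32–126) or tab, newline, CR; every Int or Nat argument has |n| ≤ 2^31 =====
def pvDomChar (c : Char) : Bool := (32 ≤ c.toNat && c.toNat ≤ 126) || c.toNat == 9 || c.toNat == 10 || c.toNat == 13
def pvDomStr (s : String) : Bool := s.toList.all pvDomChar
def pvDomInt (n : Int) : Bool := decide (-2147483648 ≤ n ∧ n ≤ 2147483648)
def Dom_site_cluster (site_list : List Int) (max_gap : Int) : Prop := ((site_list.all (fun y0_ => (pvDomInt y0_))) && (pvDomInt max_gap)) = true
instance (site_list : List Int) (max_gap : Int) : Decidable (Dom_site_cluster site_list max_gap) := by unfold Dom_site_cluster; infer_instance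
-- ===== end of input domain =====

-- B replaces A's streaming accumulator loop by two staged index passes — compute the break indices, then slice the sorted list at them (alternative decomposition; same cost).

-- ===== PORT A =====
-- sorted(list(set(site_list))): the result does not depend on set iteration order (identity sort key), so this is exact.
def site_cluster (site_list : List Int) (max_gap : Int) : List (List Int) :=
  let sorted_list := PySem.List.sorted (PySem.Set.ofList site_list) (fun x => x) false
  let st := sorted_list.foldl (fun (st : List (List Int) × List Int) temp =>
    let cluster_list := st.1
    let temp_cluster := st.2
    if temp_cluster = [] then
      (cluster_list, temp_cluster ++ [temp])
    else
      -- temp_cluster[-1]; the branch guarantees temp_cluster ≠ [], so pyGet? is some; .getD 0 is never used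
      let lower := (PySem.List.pyGet? temp_cluster (-1)).getD 0
      if temp - lower ≤ max_gap then (cluster_list, temp_cluster ++ [temp])
      else (cluster_list ++ [temp_cluster], [temp])) ([], [])
  st.1 ++ [st.2]

-- ===== PORT B =====
-- s[i], s[i-1] inside the comprehension: i ranges over 1..len(s)-1, so both indices are in range and the total pyGetD _ _ 0 is exact.
def site_cluster_alt (site_list : List Int) (max_gap : Int) : List (List Int) :=
  let s := PySem.List.sorted (PySem.Set.ofList site_list) (fun x => x) false
  let n : Int := s.length
  let cuts := [0] ++ (PySem.List.pyRange 1 n 1).filter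
      (fun i => PySem.List.pyGetD s i 0 - PySem.List.pyGetD s (i - 1) 0 > max_gap) ++ [n]
  (cuts.zip cuts.tail).map (fun ab => PySem.List.slice s (some ab.1) (some ab.2))

-- ===== PRECONDITION & SPEC =====
def Spec_site_cluster (site_list : List Int) (max_gap : Int) (out : List (List Int)) : Prop := out = site_cluster_alt site_list max_gap
instance (site_list : List Int) (max_gap : Int) (out : List (List Int)) : Decidable (Spec_site_cluster site_list max_gap out) := by unfold Spec_site_cluster; infer_instance

-- ===== CLAIM (what is proved, stated in full; the proofs are below) =====
def Claim_equal_site_cluster : Prop := ∀ (site_list : List Int) (max_gap : Int), Dom_site_cluster site_list max_gap → Spec_site_cluster site_list max_gap (site_cluster site_list max_gap)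

-- ===== LEMMAS AND PROOFS =====

-- one step of the greedy grouping on the in-order cluster list (the common reference shape)
def pvStepB (max_gap x : Int) (clusters : List (List Int)) : List (List Int) :=
  match clusters with
  | first :: rest =>
    match first with
    | y :: _ => if y - x ≤ max_gap then (x :: first) :: rest else [x] :: first :: rest
    | [] => [x] :: rest
  | [] => []

-- A's loop as a structural recursion on the remaining input
def pvLoopA (g : Int) : List Int → List (List Int) → List Int → List (List Int)
  | [], acc, temp => acc ++ [temp]
  | x :: xs, acc, temp =>
    if temp = [] then pvLoopA g xs acc (temp ++ [x])
    else if x - (PySem.List.pyGet? temp (-1)).getD 0 ≤ g then pvLoopA g xs acc (temp ++ [x])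
    else pvLoopA g xs (acc ++ [temp]) [x]

theorem pvLoopA_eq_foldl (g : Int) (xs : List Int) (acc : List (List Int)) (temp : List Int) :
    pvLoopA g xs acc temp =
      (xs.foldl (fun (st : List (List Int) × List Int) x =>
        if st.2 = [] then (st.1, st.2 ++ [x])
        else if x - (PySem.List.pyGet? st.2 (-1)).getD 0 ≤ g then (st.1, st.2 ++ [x])
        else (st.1 ++ [st.2], [x])) (acc, temp)).1 ++
      [(xs.foldl (fun (st : List (List Int) × List Int) x =>
        if st.2 = [] then (st.1, st.2 ++ [x])
        else if x - (PySem.List.pyGet? st.2 (-1)).getD 0 ≤ g then (st.1, st.2 ++ [x])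
        else (st.1 ++ [st.2], [x])) (acc, temp)).2] := by
  induction xs generalizing acc temp with
  | nil => simp [pvLoopA]
  | cons x xs ih =>
    simp only [pvLoopA, List.foldl_cons]
    split_ifs with h1 h2 <;> simp [*]

theorem pvLoopA_acc (g : Int) (xs : List Int) (acc : List (List Int)) (temp : List Int) :
    pvLoopA g xs acc temp = acc ++ pvLoopA g xs [] temp := by
  induction xs generalizing acc temp with
  | nil => simp [pvLoopA]
  | cons x xs ih =>
    simp only [pvLoopA]
    split_ifs with h1 h2
    · exact ih _ _
    · exact ih _ _
    · rw [ih (acc ++ [temp]) [x], ih ([] ++ [temp]) [x]]; simp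

theorem pvLoopA_head (g : Int) (xs : List Int) (t : Int) (ts : List Int) :
    ∃ c cs, pvLoopA g xs [] (t :: ts) = (t :: c) :: cs := by
  induction xs generalizing ts with
  | nil => exact ⟨ts, [], rfl⟩
  | cons x xs ih =>
    simp only [pvLoopA]
    by_cases h : x - (PySem.List.pyGet? (t :: ts) (-1)).getD 0 ≤ g
    · simpa [h] using ih (ts ++ [x])
    · simp only [h, if_false, reduceCtorEq]
      rw [pvLoopA_acc]
      exact ⟨ts, pvLoopA g xs [] [x], rfl⟩

theorem pvLoopA_consHead (g : Int) (xs : List Int) (x t : Int) (ts : List Int) :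
    pvLoopA g xs [] (x :: t :: ts) =
      match pvLoopA g xs [] (t :: ts) with
      | c :: cs => (x :: c) :: cs
      | [] => [] := by
  induction xs generalizing ts with
  | nil => simp [pvLoopA]
  | cons y xs ih =>
    have hlast : (PySem.List.pyGet? (x :: t :: ts) (-1)).getD 0
        = (PySem.List.pyGet? (t :: ts) (-1)).getD 0 := by
      simp [PySem.List.pyGet?_neg_one, List.getLast?_cons_cons]
    simp only [pvLoopA, reduceCtorEq, if_false, hlast]
    by_cases h : y - (PySem.List.pyGet? (t :: ts) (-1)).getD 0 ≤ g
    · simpa [h] using ih (ts ++ [y])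
    · simp only [h, if_false, List.nil_append]
      rw [pvLoopA_acc g xs [x :: t :: ts] [y], pvLoopA_acc g xs [t :: ts] [y]]
      simp

theorem pvLoopA_step (g : Int) (xs : List Int) (x : Int) :
    pvLoopA g xs [] [x] = pvStepB g x (pvLoopA g xs [] []) := by
  cases xs with
  | nil => simp [pvLoopA, pvStepB]
  | cons y ys =>
    have hx : pvLoopA g (y :: ys) [] [x]
        = if y - x ≤ g then pvLoopA g ys [] [x, y] else pvLoopA g ys [[x]] [y] := by
      simp [pvLoopA, PySem.List.pyGet?_neg_one]
    have hy : pvLoopA g (y :: ys) [] [] = pvLoopA g ys [] [y] := by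
      simp [pvLoopA]
    rw [hx, hy]
    obtain ⟨c, cs, hc⟩ := pvLoopA_head g ys y []
    by_cases h : y - x ≤ g
    · rw [if_pos h, pvLoopA_consHead g ys x y []]
      simp [hc, pvStepB, h]
    · rw [if_neg h, pvLoopA_acc]
      simp [hc, pvStepB, h]

theorem pvLoopA_eq_foldr (g : Int) (s : List Int) :
    pvLoopA g s [] [] = s.foldr (fun x clusters => pvStepB g x clusters) [[]] := by
  induction s with
  | nil => simp [pvLoopA]
  | cons x xs ih =>
    simp only [pvLoopA, List.foldr_cons, ← ih]
    exact pvLoopA_step g xs x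

theorem pvRange_shift (a b : Int) :
    PySem.List.pyRange (a+1) (b+1) 1 = (PySem.List.pyRange a b 1).map (· + 1) := by
  simp only [PySem.List.pyRange_one, List.map_map]
  rw [show b + 1 - (a + 1) = b - a by ring]
  exact List.map_congr_left (fun k _ => by simp; ring)

theorem pvGetD_cons (x d : Int) (xs : List Int) (i : Int) (h : 1 ≤ i) :
    PySem.List.pyGetD (x :: xs) i d = PySem.List.pyGetD xs (i-1) d := by
  simp only [PySem.List.pyGetD, PySem.List.pyGet?, PySem.List.pyIdx?, List.length_cons]
  rw [if_pos (by omega : (0:Int) ≤ i), if_pos (by omega : (0:Int) ≤ i - 1)]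
  by_cases hle : i - 1 < (xs.length : Int)
  · rw [if_pos (by push_cast; omega), if_pos hle]
    rw [show i.toNat = (i-1).toNat + 1 by omega]
    simp
  · rw [if_neg (by push_cast; omega), if_neg hle]
    simp

theorem pvGetD_zero (x d : Int) (xs : List Int) : PySem.List.pyGetD (x :: xs) 0 d = x := by
  simp [PySem.List.pyGetD, PySem.List.pyGet?, PySem.List.pyIdx?]

def pvNb (g : Int) : List Int → List Int
  | x :: y :: rest => (if y - x > g then [1] else []) ++ (pvNb g (y :: rest)).map (· + 1)
  | _ => []

theorem pvFilter_eq_pvNb (g : Int) (s : List Int) :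
    (PySem.List.pyRange 1 (s.length : Int) 1).filter
      (fun i => PySem.List.pyGetD s i 0 - PySem.List.pyGetD s (i - 1) 0 > g) = pvNb g s := by
  induction s with
  | nil => simp [pvNb, PySem.List.pyRange_one_eq_nil]
  | cons x xs ih =>
    cases xs with
    | nil => simp [pvNb, PySem.List.pyRange_one_eq_nil]
    | cons y rest =>
      have hm : (1:Int) ≤ ((y :: rest).length : Int) := by simp
      have hlen : ((x :: y :: rest).length : Int) = ((y :: rest).length : Int) + 1 := by
        push_cast [List.length_cons]; ring
      rw [hlen,
        PySem.List.pyRange_one_append 1 2 (((y :: rest).length : Int) + 1) (by omega) (by omega),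
        show PySem.List.pyRange 1 2 1 = [1] from by
          rw [show (2:Int) = 1 + 1 by ring]; exact PySem.List.pyRange_one_singleton 1,
        show PySem.List.pyRange 2 (((y :: rest).length : Int) + 1) 1
            = (PySem.List.pyRange 1 ((y :: rest).length : Int) 1).map (· + 1) from by
          rw [show (2:Int) = 1 + 1 by ring]; exact pvRange_shift 1 _,
        List.filter_append, List.filter_map]
      have h1 : PySem.List.pyGetD (x :: y :: rest) 1 0 = y := by
        rw [pvGetD_cons _ _ _ _ le_rfl]; norm_num [pvGetD_zero]
      have h0 : PySem.List.pyGetD (x :: y :: rest) (1 - 1) 0 = x := by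
        norm_num [pvGetD_zero]
      have hcg : List.filter
          ((fun i => decide (PySem.List.pyGetD (x :: y :: rest) i 0
              - PySem.List.pyGetD (x :: y :: rest) (i - 1) 0 > g)) ∘ (· + 1))
          (PySem.List.pyRange 1 ((y :: rest).length : Int) 1)
          = List.filter (fun i => decide (PySem.List.pyGetD (y :: rest) i 0
              - PySem.List.pyGetD (y :: rest) (i - 1) 0 > g))
            (PySem.List.pyRange 1 ((y :: rest).length : Int) 1) := by
        apply List.filter_congr
        intro j hj
        have hj1 : 1 ≤ j := (PySem.List.mem_pyRange_one.mp hj).1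
        simp only [Function.comp]
        rw [pvGetD_cons x 0 _ (j+1) (by omega), show j + 1 - 1 = j by ring,
          pvGetD_cons x 0 _ j (by omega)]
      rw [hcg, ih]
      simp only [List.filter_cons, List.filter_nil, h1, h0, pvNb]
      split_ifs with h <;> simp_all

theorem pvNb_pos (g : Int) (s : List Int) : ∀ b ∈ pvNb g s, 1 ≤ b := by
  induction s with
  | nil => simp [pvNb]
  | cons x xs ih =>
    cases xs with
    | nil => simp [pvNb]
    | cons y rest =>
      intro b hb
      simp only [pvNb, List.mem_append, List.mem_map] at hb
      rcases hb with hb | ⟨a, ha, rfl⟩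
      · split_ifs at hb <;> simp_all
      · have := ih a ha; omega

def pvSliceAt (s : List Int) (cuts : List Int) : List (List Int) :=
  (cuts.zip cuts.tail).map (fun ab => PySem.List.slice s (some ab.1) (some ab.2))

theorem pvSliceAt_cons (s : List Int) (a b : Int) (t : List Int) :
    pvSliceAt s (a :: b :: t) = PySem.List.slice s (some a) (some b) :: pvSliceAt s (b :: t) := by
  simp [pvSliceAt]

theorem pvSlice_succ (x : Int) (s' : List Int) (a b : Int) (ha : 0 ≤ a) (hb : 0 ≤ b) :
    PySem.List.slice (x :: s') (some (a+1)) (some (b+1)) = PySem.List.slice s' (some a) (some b) := by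
  rw [PySem.List.slice_toNat _ (by omega) (by omega), PySem.List.slice_toNat _ ha hb,
    show (a+1).toNat = a.toNat + 1 by omega, show (b+1).toNat = b.toNat + 1 by omega]
  simp

theorem pvSlice_zero_succ (x : Int) (s' : List Int) (c : Int) (hc : 0 ≤ c) :
    PySem.List.slice (x :: s') (some 0) (some (c+1)) = x :: PySem.List.slice s' (some 0) (some c) := by
  rw [PySem.List.slice_toNat _ le_rfl (by omega), PySem.List.slice_toNat _ le_rfl hc,
    show (c+1).toNat = c.toNat + 1 by omega]
  simp

theorem pvSliceAt_shift (x : Int) (s' : List Int) (cuts : List Int) (h : ∀ c ∈ cuts, 0 ≤ c) :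
    pvSliceAt (x :: s') (cuts.map (· + 1)) = pvSliceAt s' cuts := by
  unfold pvSliceAt
  rw [← List.map_tail, List.zip_map, List.map_map]
  apply List.map_congr_left
  intro p hp
  obtain ⟨hp1, hp2⟩ := List.of_mem_zip hp
  exact pvSlice_succ x s' p.1 p.2 (h _ hp1) (h _ (List.mem_of_mem_tail hp2))

theorem pvFoldr_head (g y : Int) (rest : List Int) :
    ∃ c cs, (y :: rest).foldr (fun x clusters => pvStepB g x clusters) [[]] = (y :: c) :: cs := by
  induction rest generalizing y with
  | nil => exact ⟨[], [], rfl⟩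
  | cons z rs ih =>
    obtain ⟨c, cs, hc⟩ := ih z
    simp only [List.foldr_cons] at hc ⊢
    rw [hc]
    by_cases h : z - y ≤ g
    · exact ⟨z :: c, cs, by simp [pvStepB, h]⟩
    · exact ⟨[], (z :: c) :: cs, by simp [pvStepB, h]⟩

theorem pvSliceAt_eq_foldr (g : Int) (s : List Int) :
    pvSliceAt s (0 :: (pvNb g s ++ [(s.length : Int)]))
      = s.foldr (fun x clusters => pvStepB g x clusters) [[]] := by
  induction s with
  | nil => simp [pvNb, pvSliceAt, PySem.List.slice_toNat]
  | cons x xs ih =>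
    cases xs with
    | nil =>
      simp only [pvNb, List.nil_append, List.length_cons, List.length_nil, Nat.cast_one,
        Nat.zero_add, List.foldr]
      rfl
    | cons y rest =>
      have hnbpos := pvNb_pos g (y :: rest)
      have hall : ∀ c ∈ (0 : Int) :: (pvNb g (y :: rest) ++ [((y :: rest).length : Int)]), 0 ≤ c := by
        intro c hc
        rcases List.mem_cons.mp hc with rfl | hc
        · exact le_rfl
        · rcases List.mem_append.mp hc with hc | hc
          · exact le_trans (by norm_num) (hnbpos c hc)
          · simp at hc; omega
      obtain ⟨c, cs, hfold⟩ := pvFoldr_head g y rest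
      by_cases hbr : y - x > g
      · -- break between x and y: cuts = 0 :: map (+1) (cuts of tail)
        have hcuts : (0:Int) :: (pvNb g (x :: y :: rest) ++ [((x :: y :: rest).length : Int)])
            = 0 :: (((0:Int) :: (pvNb g (y :: rest) ++ [((y :: rest).length : Int)])).map (· + 1)) := by
          simp [pvNb, hbr]
        rw [hcuts]
        have hsh := pvSliceAt_shift x (y :: rest) _ hall
        have h01 : PySem.List.slice (x :: y :: rest) (some 0) (some 1) = [x] := by
          rw [show (1:Int) = 0 + 1 by ring, pvSlice_zero_succ _ _ _ le_rfl,
            PySem.List.slice_toNat _ le_rfl le_rfl]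
          simp
        rw [List.map_cons, pvSliceAt_cons, show (0:Int) + 1 = 1 by ring, h01]
        rw [List.map_cons, show (0:Int) + 1 = 1 by ring] at hsh
        rw [hsh, ih]
        simp only [List.foldr_cons]
        rw [show pvStepB g y (rest.foldr (fun x clusters => pvStepB g x clusters) [[]])
            = (y :: c) :: cs from by simpa using hfold]
        simp [pvStepB, show ¬ (y - x ≤ g) by omega]
      · -- no break: first group of the tail gains x at its front
        obtain ⟨c1, t', ht⟩ : ∃ c1 t', pvNb g (y :: rest) ++ [((y :: rest).length : Int)] = c1 :: t' := by
          cases h : pvNb g (y :: rest) ++ [((y :: rest).length : Int)] with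
          | nil => simp at h
          | cons a b => exact ⟨a, b, rfl⟩
        have hc1 : 0 ≤ c1 := hall c1 (by rw [ht]; simp)
        have hallt : ∀ e ∈ c1 :: t', 0 ≤ e := by rw [← ht]; intro e he; exact hall e (List.mem_cons_of_mem _ he)
        have hcuts : (0:Int) :: (pvNb g (x :: y :: rest) ++ [((x :: y :: rest).length : Int)])
            = 0 :: ((c1 :: t').map (· + 1)) := by
          simp [pvNb, hbr, ← ht]
        rw [hcuts, List.map_cons, pvSliceAt_cons]
        have hsh := pvSliceAt_shift x (y :: rest) (c1 :: t') hallt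
        rw [List.map_cons] at hsh
        -- use IH at the tail, decomposed
        have hIH := ih
        rw [ht, pvSliceAt_cons, hfold] at hIH
        rw [List.cons.injEq] at hIH
        rw [pvSlice_zero_succ _ _ _ hc1, hsh, hIH.1, hIH.2]
        simp only [List.foldr_cons]
        rw [show pvStepB g y (rest.foldr (fun x clusters => pvStepB g x clusters) [[]])
            = (y :: c) :: cs from by simpa using hfold]
        simp [pvStepB, show y - x ≤ g by omega]

-- ===== VERDICT (by name: the statement is the Claim_ definition above) =====
theorem site_cluster_spec : Claim_equal_site_cluster := by
  intro site_list max_gap _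
  unfold Spec_site_cluster site_cluster site_cluster_alt
  simp only []
  rw [← pvLoopA_eq_foldl, pvLoopA_eq_foldr, pvFilter_eq_pvNb,
    show ([(0:Int)] ++ pvNb max_gap (PySem.List.sorted (PySem.Set.ofList site_list) (fun x => x) false)
        ++ [((PySem.List.sorted (PySem.Set.ofList site_list) (fun x => x) false).length : Int)])
      = 0 :: (pvNb max_gap (PySem.List.sorted (PySem.Set.ofList site_list) (fun x => x) false)
        ++ [((PySem.List.sorted (PySem.Set.ofList site_list) (fun x => x) false).length : Int)]) from by simp]
  exact (pvSliceAt_eq_foldr max_gap _).symm
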